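-- pv_equiv track=rewrite | github.com/genovo-ai/memg-core | src/memg_core/utils/hrid.py | _type_key
-- ===== SOURCE A (Python) =====
-- def _type_key(t: str) -> int:
--     """
--     Deterministic numeric key for type names to enable cross-type ordering.
--     Encodes up to the first 8 chars in base-37 (A–Z=1–26, 0–9=27–36).
--     """
--     t = t.upper()
--     key = 0
--     for c in t[:8]:
--         if "A" <= c <= "Z":
--             v = 1 + (ord(c) - ord("A"))
--         elif "0" <= c <= "9":
--             v = 27 + (ord(c) - ord("0"))
--         else:
--             v = 0
--         key = key * 37 + v
--     return key
-- ===== SOURCE B (Python) =====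
-- def _type_key(t: str) -> int:
--     def val(c: str) -> int:
--         if "A" <= c <= "Z":
--             return 1 + (ord(c) - ord("A"))
--         if "0" <= c <= "9":
--             return 27 + (ord(c) - ord("0"))
--         return 0
--     digits = [val(c) for c in t.upper()[:8]]
--     return sum(v * 37 ** i for i, v in enumerate(reversed(digits)))
-- ===== Notes on version B (the rewrite author's own statement) =====
-- stated objective: alternative
-- what changed: Replaces the running Horner accumulation with a mapping pass that builds the list of base-37 digit values followed by a positional weighted sum (digit * 37**position over the reversed digit list).
import Mathlib
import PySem

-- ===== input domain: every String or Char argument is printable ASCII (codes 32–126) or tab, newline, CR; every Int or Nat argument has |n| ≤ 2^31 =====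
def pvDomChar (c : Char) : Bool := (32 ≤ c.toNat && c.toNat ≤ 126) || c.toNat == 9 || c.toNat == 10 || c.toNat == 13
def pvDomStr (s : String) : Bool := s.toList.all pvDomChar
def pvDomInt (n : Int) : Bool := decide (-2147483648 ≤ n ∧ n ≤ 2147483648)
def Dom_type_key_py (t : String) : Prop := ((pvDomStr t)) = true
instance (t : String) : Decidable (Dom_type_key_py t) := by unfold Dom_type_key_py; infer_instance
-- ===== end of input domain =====

-- B replaces A's running Horner accumulation by a digit-mapping pass followed by a
-- positional weighted sum (alternative decomposition, same cost).


-- ===== PORT A =====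
-- t.upper() → PySem.Chars.upper; t[:8] → PySem.List.slice … none (some 8); the loop is a foldl
def type_key_py (t : String) : Int :=
  (PySem.List.slice (PySem.Chars.upper t.toList) none (some 8)).foldl
    (fun key c =>
      key * 37 +
        (if 'A' ≤ c ∧ c ≤ 'Z' then 1 + ((c.toNat : Int) - ('A'.toNat : Int))
         else if '0' ≤ c ∧ c ≤ '9' then 27 + ((c.toNat : Int) - ('0'.toNat : Int))
         else 0)) 0

-- ===== PORT B =====
def tkVal (c : Char) : Int :=
  if 'A' ≤ c ∧ c ≤ 'Z' then 1 + ((c.toNat : Int) - ('A'.toNat : Int))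
  else if '0' ≤ c ∧ c ≤ '9' then 27 + ((c.toNat : Int) - ('0'.toNat : Int))
  else 0

-- enumerate(reversed(digits)); the index from enumerate is ≥ 0, so '.toNat' in 37^i is exact
def type_key_py_alt (t : String) : Int :=
  let digits := (PySem.List.slice (PySem.Chars.upper t.toList) none (some 8)).map tkVal
  ((PySem.List.enumerate digits.reverse 0).map (fun p => p.2 * 37 ^ p.1.toNat)).sum

-- ===== PRECONDITION & SPEC =====
def Spec_type_key_py (t : String) (out : Int) : Prop := out = type_key_py_alt t
instance (t : String) (out : Int) : Decidable (Spec_type_key_py t out) := by unfold Spec_type_key_py; infer_instance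

-- ===== CLAIM (what is proved, stated in full; the proofs are below) =====
def Claim_equal_type_key_py : Prop := ∀ (t : String), Dom_type_key_py t → Spec_type_key_py t (type_key_py t)

-- ===== LEMMAS AND PROOFS =====

theorem tk_shift (xs : List Int) : ∀ (s : Int), 0 ≤ s →
    ((PySem.List.enumerate xs (s + 1)).map (fun p => p.2 * 37 ^ p.1.toNat)).sum
      = 37 * ((PySem.List.enumerate xs s).map (fun p => p.2 * 37 ^ p.1.toNat)).sum := by
  induction xs with
  | nil => intro s _; simp
  | cons x xs ih =>
    intro s hs
    simp only [PySem.List.enumerate_cons, List.map_cons, List.sum_cons]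
    rw [ih (s + 1) (by omega)]
    have h1 : (s + 1).toNat = s.toNat + 1 := by omega
    rw [h1, pow_succ]
    ring

theorem tk_horner (ds : List Int) : ∀ (a : Int),
    ds.foldl (fun k v => k * 37 + v) a
      = a * 37 ^ ds.length +
        ((PySem.List.enumerate ds.reverse 0).map (fun p => p.2 * 37 ^ p.1.toNat)).sum := by
  induction ds using List.reverseRecOn with
  | nil => intro a; simp
  | append_singleton ds c ih =>
    intro a
    rw [List.foldl_append]
    simp only [List.foldl_cons, List.foldl_nil, List.reverse_append, List.reverse_cons,
      List.reverse_nil, List.nil_append, List.cons_append, PySem.List.enumerate_cons,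
      List.map_cons, List.sum_cons, List.length_append, List.length_cons, List.length_nil]
    rw [ih a, tk_shift _ 0 (by omega)]
    simp [pow_succ]
    ring

-- ===== VERDICT (by name: the statement is the Claim_ definition above) =====
theorem type_key_py_spec : Claim_equal_type_key_py := by
  intro t _
  unfold Spec_type_key_py type_key_py type_key_py_alt
  have h := tk_horner ((PySem.List.slice (PySem.Chars.upper t.toList) none (some 8)).map tkVal) 0
  rw [List.foldl_map] at h
  simpa [tkVal] using h
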